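-- pv_equiv track=rewrite | github.com/pypi-data/pypi-mirror-197 | packages/rime-sdk/rime_sdk-2.0.0b9.tar.gz/rime_sdk-2.0.0b9/rime_sdk/internal/swagger_utils.py | select_oneof
-- ===== SOURCE A (Python) =====
-- from typing import Any, Dict, List, Optional, TypeVar
--
-- def select_oneof(oneof_map: Dict[str, Any], key_list: List[str]) -> Any:
--     """Select one of the keys in the map.
--
--     Args:
--         oneof_map: The map to select from.
--         key_list: The list of keys to select from.
--
--     Returns:
--         The key that was selected.
--
--     Raises:
--         ValueError
--             When more than one of the keys are provided in the map.
--     """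
--     selected_key = None
--     for key in key_list:
--         if key in oneof_map:
--             if selected_key is not None:
--                 raise ValueError(
--                     f"More than one of the keys {key_list} were provided in the map."
--                 )
--             selected_key = key
--     if selected_key is None:
--         raise ValueError(f"None of the keys {key_list} were provided in the map.")
--     return selected_key
-- ===== SOURCE B (Python) =====
-- from typing import Any, Dict, List
--
-- def select_oneof(oneof_map: Dict[str, Any], key_list: List[str]) -> Any:
--     # Inverted traversal: walk the dict's keys, counting their occurrences in key_list.
--     total = sum(key_list.count(k) for k in oneof_map)
--     if total == 0:
--         raise ValueError(f"None of the keys {key_list} were provided in the map.")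
--     if total > 1:
--         raise ValueError(
--             f"More than one of the keys {key_list} were provided in the map."
--         )
--     for k in oneof_map:
--         if k in key_list:
--             return k
-- ===== Notes on version B (the rewrite author's own statement) =====
-- stated objective: alternative
-- what changed: B inverts the traversal: instead of scanning key_list with a selected-key accumulator and early raise, it iterates the dict's keys, totals their multiplicities in key_list, dispatches once on that total, and then returns the dict key that occurs in key_list.
import Mathlib
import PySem

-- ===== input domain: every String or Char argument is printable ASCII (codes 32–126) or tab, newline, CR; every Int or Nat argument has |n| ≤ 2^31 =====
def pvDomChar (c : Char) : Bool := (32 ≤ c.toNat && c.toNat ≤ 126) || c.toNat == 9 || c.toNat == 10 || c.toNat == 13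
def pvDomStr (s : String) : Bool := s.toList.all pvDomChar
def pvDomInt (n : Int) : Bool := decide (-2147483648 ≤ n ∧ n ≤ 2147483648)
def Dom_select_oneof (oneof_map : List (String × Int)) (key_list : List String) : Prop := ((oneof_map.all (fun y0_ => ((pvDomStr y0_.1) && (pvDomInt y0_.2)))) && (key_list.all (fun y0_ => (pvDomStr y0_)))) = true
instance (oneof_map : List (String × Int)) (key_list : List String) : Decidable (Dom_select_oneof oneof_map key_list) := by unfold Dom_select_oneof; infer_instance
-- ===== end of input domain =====

-- B inverts the traversal: it iterates the dict's keys and counts their occurrences in key_list,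
-- instead of A's scan of key_list with an accumulator and early raise; same behaviour (alternative decomposition).
-- ===== PORT A =====
-- `key in oneof_map` (dict key membership)
def pvHasKey (oneof_map : List (String × Int)) (k : String) : Bool :=
  oneof_map.any (fun p => p.1 == k)

-- A's loop; outer `none` = ValueError raised, inner state = selected_key.
def selectLoopA (oneof_map : List (String × Int)) : List String → Option String → Option (Option String)
  | [], acc => some acc
  | k :: ks, acc =>
    if pvHasKey oneof_map k then
      match acc with
      | some _ => none
      | none => selectLoopA oneof_map ks (some k)
    else selectLoopA oneof_map ks acc

def select_oneof (oneof_map : List (String × Int)) (key_list : List String) : String :=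
  match selectLoopA oneof_map key_list none with
  | some (some k) => k
  | _ => ""  -- A raises ValueError here; excluded by Pre_

-- ===== PORT B =====
-- iteration over the Python dict = the map's keys with first occurrences kept (PySem.List.dedup)
def select_oneof_alt (oneof_map : List (String × Int)) (key_list : List String) : String :=
  let keys := PySem.List.dedup (oneof_map.map Prod.fst)
  let total := keys.foldl (fun acc k => acc + key_list.count k) 0
  if total = 0 then ""        -- B raises ValueError here; excluded by Pre_
  else if 1 < total then ""   -- B raises ValueError here; excluded by Pre_
  else
    match keys.find? (fun k => key_list.contains k) with
    | some k => k
    | none => ""              -- unreachable: total = 1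

-- ===== PRECONDITION & SPEC =====
-- Exactly one key of key_list (counted with multiplicity) is a key of oneof_map; otherwise A raises ValueError.
def Pre_select_oneof (oneof_map : List (String × Int)) (key_list : List String) : Prop :=
  key_list.countP (fun k => (oneof_map.map Prod.fst).contains k) = 1
instance (oneof_map : List (String × Int)) (key_list : List String) : Decidable (Pre_select_oneof oneof_map key_list) := by unfold Pre_select_oneof; infer_instance
def pvWitness_select_oneof : (List (String × Int)) × List String := ([("a", 1), ("c", 2)], ["a", "b"])
def Spec_select_oneof (oneof_map : List (String × Int)) (key_list : List String) (out : String) : Prop := out = select_oneof_alt oneof_map key_list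
instance (oneof_map : List (String × Int)) (key_list : List String) (out : String) : Decidable (Spec_select_oneof oneof_map key_list out) := by unfold Spec_select_oneof; infer_instance

-- ===== CLAIM (what is proved, stated in full; the proofs are below) =====
def Claim_equal_select_oneof : Prop := ∀ (oneof_map : List (String × Int)) (key_list : List String), Dom_select_oneof oneof_map key_list → Pre_select_oneof oneof_map key_list → Spec_select_oneof oneof_map key_list (select_oneof oneof_map key_list)

-- ===== LEMMAS AND PROOFS =====

theorem contains_eq_hasKey (oneof_map : List (String × Int)) (k : String) :
    (oneof_map.map Prod.fst).contains k = pvHasKey oneof_map k := by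
  rw [Bool.eq_iff_iff]
  simp [pvHasKey, beq_iff_eq]

theorem hasKey_iff_mem_keys (oneof_map : List (String × Int)) (k : String) :
    pvHasKey oneof_map k = true ↔ k ∈ PySem.List.dedup (oneof_map.map Prod.fst) := by
  rw [← contains_eq_hasKey]
  simp

-- once a key is selected, A's loop succeeds iff no further key matches
theorem selectLoopA_some (oneof_map : List (String × Int)) (ks : List String) (x : String) :
    selectLoopA oneof_map ks (some x) =
      if ks.filter (fun k => pvHasKey oneof_map k) = [] then some (some x) else none := by
  induction ks with
  | nil => simp [selectLoopA]
  | cons k ks ih =>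
    by_cases h : pvHasKey oneof_map k = true <;>
      simp [selectLoopA, h, ih]

theorem selectLoopA_none (oneof_map : List (String × Int)) (ks : List String) :
    selectLoopA oneof_map ks none =
      match ks.filter (fun k => pvHasKey oneof_map k) with
      | [] => some none
      | [k] => some (some k)
      | _ => none := by
  induction ks with
  | nil => simp [selectLoopA]
  | cons k ks ih =>
    by_cases h : pvHasKey oneof_map k = true
    · rw [show selectLoopA oneof_map (k :: ks) none = selectLoopA oneof_map ks (some k) from by
        simp [selectLoopA, h]]
      rw [selectLoopA_some, List.filter_cons_of_pos (by simpa using h)]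
      cases ks.filter (fun x => pvHasKey oneof_map x) <;> simp
    · simp [selectLoopA, h, ih]

-- sum over a list of a pointwise sum splits
theorem sum_map_add (l : List String) (f g : String → Nat) :
    (l.map (fun k => f k + g k)).sum = (l.map f).sum + (l.map g).sum := by
  induction l with
  | nil => simp
  | cons a l ih => simp [ih]; omega

-- sum of an indicator over a duplicate-free list
theorem sum_indicator (x : String) (l : List String) (hnd : l.Nodup) :
    (l.map (fun k => if x = k then 1 else 0)).sum = if x ∈ l then 1 else 0 := by
  induction l with
  | nil => simp
  | cons a l ih =>
    rw [List.nodup_cons] at hnd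
    by_cases hx : x = a
    · subst hx
      have hz : (l.map (fun k => if x = k then 1 else 0)).sum = 0 := by
        apply List.sum_eq_zero
        intro n hn
        obtain ⟨b, hb, rfl⟩ := List.mem_map.mp hn
        have hne : x ≠ b := fun h => hnd.1 (h ▸ hb)
        simp [hne]
      simp [hz]
    · simp [hx, ih hnd.2]

-- the foldl accumulates the sum of the counts
theorem foldl_add_count (ks l : List String) (n : Nat) :
    l.foldl (fun acc k => acc + ks.count k) n = n + (l.map (fun k => ks.count k)).sum := by
  induction l generalizing n with
  | nil => simp
  | cons a l ih => simp [List.foldl_cons, ih]; omega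

-- B's total = the number of elements of ks lying in `keys`, counted with multiplicity,
-- for any duplicate-free key list `keys`.
theorem total_eq_countP (keys ks : List String) (hnd : keys.Nodup) :
    keys.foldl (fun acc k => acc + ks.count k) 0 =
      ks.countP (fun k => keys.contains k) := by
  rw [foldl_add_count, Nat.zero_add]
  induction ks with
  | nil => simp
  | cons x ks ih =>
    have h1 : keys.map (fun k => (x :: ks).count k)
        = keys.map (fun k => ks.count k + if x = k then 1 else 0) := by
      apply List.map_congr_left; intro k _
      by_cases h : x = k <;> simp [List.count_cons, h, eq_comm]
    rw [h1, sum_map_add (f := fun k => ks.count k) (g := fun k => if x = k then 1 else 0), ih,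
      sum_indicator x keys hnd, List.countP_cons]
    by_cases h : x ∈ keys <;> simp [h]

-- first match of find? when the satisfying element is unique
theorem find?_unique (p : String → Bool) (keys : List String) (k : String)
    (hk : k ∈ keys) (hp : p k = true)
    (huniq : ∀ k' ∈ keys, p k' = true → k' = k) :
    keys.find? p = some k := by
  induction keys with
  | nil => cases hk
  | cons a l ih =>
    by_cases h : p a = true
    · have hak : a = k := huniq a (by simp) h
      subst hak
      simp [List.find?, h]
    · rcases List.mem_cons.mp hk with h' | h'
      · exact absurd (h' ▸ hp) (by simpa using h)
      · simp only [List.find?, h]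
        exact ih h' (fun k' hm => huniq k' (List.mem_cons_of_mem _ hm))

-- ===== VERDICT (by name: the statement is the Claim_ definition above) =====
theorem select_oneof_spec : Claim_equal_select_oneof := by
  intro m ks _ hpre
  unfold Spec_select_oneof select_oneof select_oneof_alt
  have hcnt : ks.countP (fun k => pvHasKey m k) = 1 := by
    unfold Pre_select_oneof at hpre
    rw [← hpre]
    exact List.countP_congr (fun k _ => by rw [contains_eq_hasKey])
  have hcnt' : ks.countP (fun k => (PySem.List.dedup (m.map Prod.fst)).contains k) = 1 := by
    rw [← hcnt]
    apply List.countP_congr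
    intro k _
    rw [Bool.eq_iff_iff]
    simp [hasKey_iff_mem_keys]
  have htot : (PySem.List.dedup (m.map Prod.fst)).foldl (fun acc k => acc + ks.count k) 0 = 1 := by
    rw [total_eq_countP _ _ (PySem.List.nodup_dedup _), hcnt']
  have hflt : (ks.filter (fun k => pvHasKey m k)).length = 1 := by
    rw [← List.countP_eq_length_filter]; exact hcnt
  obtain ⟨k, hk⟩ := List.length_eq_one_iff.mp hflt
  have hkmem : k ∈ ks ∧ pvHasKey m k = true := by
    have : k ∈ ks.filter (fun x => pvHasKey m x) := by rw [hk]; simp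
    simpa using this
  have hfind : (PySem.List.dedup (m.map Prod.fst)).find? (fun x => ks.contains x) = some k := by
    apply find?_unique
    · exact (hasKey_iff_mem_keys m k).mp hkmem.2
    · simpa using hkmem.1
    · intro k' hm' hp'
      have : k' ∈ ks.filter (fun x => pvHasKey m x) := by
        simp only [List.mem_filter]
        exact ⟨by simpa using hp', (hasKey_iff_mem_keys m k').mpr hm'⟩
      rw [hk] at this; simpa using this
  rw [selectLoopA_none, hk]
  simp only [htot, hfind]
  norm_num
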